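-- pv_equiv track=rewrite | github.com/Szonek/ag | selection.py | gowno
-- ===== SOURCE A (Python) =====
-- def gowno(popul,f_x):
--     new_population = []
--     temp = []
--     N = len(popul)
--     dict_ind_f = {'f_x': 0, 'index': 0}
--     for j in range(N):
--         dict_ind_f['f_x'] = f_x[j]
--         dict_ind_f['index'] = j
--         temp.append(dict_ind_f.copy())
--
--     sorted_temp = sorted(temp, reverse=True, key=lambda tup: tup['f_x'])
--     i = 0
--     for j in range(N):
--         if i==4:
--             i =0
--         new_population.append(popul[sorted_temp[i]['index']])
--         i+=1
--     return new_population
-- ===== SOURCE B (Python) =====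
-- def gowno(popul, f_x):
--     N = len(popul)
--     # best: at most 4 indices, ordered by descending f_x, ties by ascending index
--     best = []
--     for j in range(N):
--         fj = f_x[j]
--         pos = len(best)
--         while pos > 0 and f_x[best[pos - 1]] < fj:
--             pos -= 1
--         if pos < 4:
--             best.insert(pos, j)
--             if len(best) > 4:
--                 best.pop()
--     if N == 0:
--         return []
--     k = len(best)
--     return [popul[best[j % k]] for j in range(N)]
-- ===== Notes on version B (the rewrite author's own statement) =====
-- stated objective: faster
-- what changed: Replaces the full sort of index/fitness records (plus the counter-reset replay loop) by a single linear scan that maintains only the top-4 indices (descending fitness, ties by ascending index) via bounded insertion, then emits popul[best[j % len(best)]] directly.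
import Mathlib
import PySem

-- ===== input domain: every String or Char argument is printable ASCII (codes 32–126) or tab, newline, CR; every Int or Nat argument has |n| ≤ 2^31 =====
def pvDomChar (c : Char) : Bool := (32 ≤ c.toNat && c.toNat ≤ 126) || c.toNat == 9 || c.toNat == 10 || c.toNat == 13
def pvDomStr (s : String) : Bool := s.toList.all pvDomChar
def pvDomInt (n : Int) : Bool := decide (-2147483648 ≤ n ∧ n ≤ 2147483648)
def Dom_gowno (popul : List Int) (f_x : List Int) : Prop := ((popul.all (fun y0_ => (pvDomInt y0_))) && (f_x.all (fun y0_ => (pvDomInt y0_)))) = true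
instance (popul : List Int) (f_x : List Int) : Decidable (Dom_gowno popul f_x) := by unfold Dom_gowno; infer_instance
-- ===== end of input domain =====

-- B replaces A's full sort of fitness records by a one-pass top-4 selection (objective: faster).

-- ===== PORT A =====
-- dict lookups tup['f_x'] / tup['index'] are ported with getD: both keys are always present.
def gowno (popul : List Int) (f_x : List Int) : List Int :=
  let N : Int := (popul.length : Int)
  let st1 := (PySem.List.pyRange 0 N 1).foldl
    (fun (st : List (PySem.Dict String Int) × PySem.Dict String Int) j =>
      let d2 := PySem.Dict.insert (PySem.Dict.insert st.2 "f_x" (PySem.List.pyGetD f_x j 0)) "index" j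
      (st.1 ++ [d2], d2))
    ([], PySem.Dict.ofList [("f_x", 0), ("index", 0)])
  let sorted_temp := PySem.List.sorted st1.1 (fun d => PySem.Dict.getD d "f_x" 0) true
  let st2 := (PySem.List.pyRange 0 N 1).foldl
    (fun (st : List Int × Int) _j =>
      let i := if st.2 == 4 then 0 else st.2
      (st.1 ++ [PySem.List.pyGetD popul
          (PySem.Dict.getD (PySem.List.pyGetD sorted_temp i PySem.Dict.empty) "index" 0) 0], i + 1))
    ([], 0)
  st2.1

-- ===== PORT B =====
-- while pos > 0 and f_x[best[pos-1]] < fj: pos -= 1   (recursion on pos; best[pos-1] is best[p] at pos = p+1)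
def gownoPos (f_x : List Int) (fj : Int) (best : List Int) : Nat → Nat
  | 0 => 0
  | p + 1 =>
      if PySem.List.pyGetD f_x (PySem.List.pyGetD best ((p : Nat) : Int) 0) 0 < fj then
        gownoPos f_x fj best p
      else p + 1

-- one iteration of B's loop body; best.pop() (drop the last element) is ported as dropLast
def gownoStep (f_x : List Int) (best : List Int) (j : Int) : List Int :=
  let fj := PySem.List.pyGetD f_x j 0
  let pos := gownoPos f_x fj best best.length
  if pos < 4 then
    let b2 := PySem.List.insert best ((pos : Nat) : Int) j
    if 4 < b2.length then b2.dropLast else b2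
  else best

def gowno_alt (popul : List Int) (f_x : List Int) : List Int :=
  let N : Int := (popul.length : Int)
  let best := (PySem.List.pyRange 0 N 1).foldl (gownoStep f_x) []
  if N == 0 then []
  else
    let k : Int := (best.length : Int)
    (PySem.List.pyRange 0 N 1).map
      (fun j => PySem.List.pyGetD popul (PySem.List.pyGetD best (PySem.Int.mod j k) 0) 0)

-- ===== PRECONDITION & SPEC =====
-- Pre_ excludes exactly the inputs where A raises IndexError (f_x shorter than popul).
def Pre_gowno (popul : List Int) (f_x : List Int) : Prop := popul.length ≤ f_x.length
instance (popul : List Int) (f_x : List Int) : Decidable (Pre_gowno popul f_x) := by unfold Pre_gowno; infer_instance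
def pvWitness_gowno : List Int × List Int := ([2, 5, 1], [3, 3, 7])
def Spec_gowno (popul : List Int) (f_x : List Int) (out : List Int) : Prop := out = gowno_alt popul f_x
instance (popul : List Int) (f_x : List Int) (out : List Int) : Decidable (Spec_gowno popul f_x out) := by unfold Spec_gowno; infer_instance

-- ===== CLAIM (what is proved, stated in full; the proofs are below) =====
def Claim_equal_gowno : Prop := ∀ (popul : List Int) (f_x : List Int), Dom_gowno popul f_x → Pre_gowno popul f_x → Spec_gowno popul f_x (gowno popul f_x)

-- ===== LEMMAS AND PROOFS =====

-- reference form of B's bounded insertion: left-to-right insertion of j by (descending f_x, index)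
def gownoIns (f_x : List Int) (j : Int) : List Int → List Int
  | [] => [j]
  | b :: bs =>
      if PySem.List.pyGetD f_x b 0 < PySem.List.pyGetD f_x j 0 then j :: b :: bs
      else b :: gownoIns f_x j bs

-- index of the first element whose fitness is below fj
def posL (f_x : List Int) (fj : Int) : List Int → Nat
  | [] => 0
  | b :: bs => if PySem.List.pyGetD f_x b 0 < fj then 0 else posL f_x fj bs + 1

-- the record {'f_x': a, 'index': b}
def mkd (a b : Int) : PySem.Dict String Int := PySem.Dict.ofList [("f_x", a), ("index", b)]

theorem mkd_items (a b : Int) : mkd a b = ⟨[("f_x", a), ("index", b)]⟩ := by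
  simp [mkd, PySem.Dict.ofList, PySem.Dict.update, PySem.Dict.insert, PySem.Dict.empty, PySem.Dict.contains]

theorem mkd_insert (a b x y : Int) :
    PySem.Dict.insert (PySem.Dict.insert (mkd a b) "f_x" x) "index" y = mkd x y := by
  simp [mkd_items, PySem.Dict.insert, PySem.Dict.contains]

theorem mkd_fkey (a b d : Int) : PySem.Dict.getD (mkd a b) "f_x" d = a := by
  simp [mkd_items, PySem.Dict.getD, PySem.Dict.get?]

theorem mkd_ikey (a b d : Int) : PySem.Dict.getD (mkd a b) "index" d = b := by
  simp [mkd_items, PySem.Dict.getD, PySem.Dict.get?]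

-- A's first loop builds the list of records
theorem foldA1 (f_x : List Int) (l : List Int) : ∀ (acc : List (PySem.Dict String Int)) (a b : Int),
    (l.foldl (fun (st : List (PySem.Dict String Int) × PySem.Dict String Int) j =>
        (st.1 ++ [PySem.Dict.insert (PySem.Dict.insert st.2 "f_x" (PySem.List.pyGetD f_x j 0)) "index" j],
         PySem.Dict.insert (PySem.Dict.insert st.2 "f_x" (PySem.List.pyGetD f_x j 0)) "index" j)) (acc, mkd a b)).1
      = acc ++ l.map (fun j => mkd (PySem.List.pyGetD f_x j 0) j) := by
  induction l with
  | nil => intro acc a b; simp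
  | cons j l ih =>
      intro acc a b
      simp only [List.foldl_cons, List.map_cons, mkd_insert]
      rw [ih]
      simp

-- stable reverse insertion by f_x on records = gownoIns on the underlying indices
theorem insertBy_mkd (f_x : List Int) (j : Int) (l : List Int) :
    PySem.List.insertBy (fun a b => decide (PySem.Dict.getD b "f_x" 0 < PySem.Dict.getD a "f_x" 0))
      (mkd (PySem.List.pyGetD f_x j 0) j) (l.map (fun b => mkd (PySem.List.pyGetD f_x b 0) b))
      = (gownoIns f_x j l).map (fun b => mkd (PySem.List.pyGetD f_x b 0) b) := by
  induction l with
  | nil => simp [PySem.List.insertBy, gownoIns]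
  | cons b bs ih =>
      by_cases h : PySem.List.pyGetD f_x b 0 < PySem.List.pyGetD f_x j 0
      · simp [PySem.List.insertBy, gownoIns, mkd_fkey, h]
      · simp [PySem.List.insertBy, gownoIns, mkd_fkey, h, ih]

theorem sortFold (f_x : List Int) (l : List Int) : ∀ acc : List Int,
    l.foldl (fun acc j => PySem.List.insertBy
        (fun a b => decide (PySem.Dict.getD b "f_x" 0 < PySem.Dict.getD a "f_x" 0))
        (mkd (PySem.List.pyGetD f_x j 0) j) acc)
      (acc.map (fun b => mkd (PySem.List.pyGetD f_x b 0) b))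
    = (l.foldl (fun acc j => gownoIns f_x j acc) acc).map (fun b => mkd (PySem.List.pyGetD f_x b 0) b) := by
  induction l with
  | nil => intro acc; rfl
  | cons j l ih =>
      intro acc
      simp only [List.foldl_cons]
      rw [insertBy_mkd, ih]

theorem sortedA (f_x : List Int) (l : List Int) :
    PySem.List.sorted (l.map (fun j => mkd (PySem.List.pyGetD f_x j 0) j))
      (fun d => PySem.Dict.getD d "f_x" 0) true
    = (l.foldl (fun acc j => gownoIns f_x j acc) []).map (fun b => mkd (PySem.List.pyGetD f_x b 0) b) := by
  rw [PySem.List.sorted_rev_eq_foldl_insertBy, List.foldl_map]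
  exact sortFold f_x l []

theorem take_cons_take (b : Int) (bs : List Int) (m : Nat) :
    (b :: bs.take m).take m = (b :: bs).take m := by
  cases m with
  | zero => rfl
  | succ t => simp [List.take_succ_cons, List.take_take]

theorem ins_take (f_x : List Int) (j : Int) (acc : List Int) : ∀ k : Nat,
    (gownoIns f_x j (acc.take k)).take k = (gownoIns f_x j acc).take k := by
  induction acc with
  | nil => intro k; simp
  | cons b bs ih =>
      intro k
      cases k with
      | zero => simp
      | succ m =>
          by_cases h : PySem.List.pyGetD f_x b 0 < PySem.List.pyGetD f_x j 0
          · simp only [List.take_succ_cons, gownoIns, h, if_pos]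
            rw [take_cons_take]
          · simp only [List.take_succ_cons, gownoIns, h, if_neg, not_false_iff]
            rw [ih m]

theorem foldTrunc (f_x : List Int) (l : List Int) : ∀ x : List Int,
    l.foldl (fun best j => (gownoIns f_x j best).take 4) (x.take 4)
    = (l.foldl (fun best j => gownoIns f_x j best) x).take 4 := by
  induction l with
  | nil => intro x; rfl
  | cons j l ih =>
      intro x
      simp only [List.foldl_cons]
      rw [ins_take]
      exact ih (gownoIns f_x j x)

theorem ins_length (f_x : List Int) (j : Int) (acc : List Int) :
    (gownoIns f_x j acc).length = acc.length + 1 := by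
  induction acc with
  | nil => rfl
  | cons b bs ih =>
      by_cases h : PySem.List.pyGetD f_x b 0 < PySem.List.pyGetD f_x j 0
      · simp [gownoIns, h]
      · simp [gownoIns, h, ih]

theorem foldIns_length (f_x : List Int) (l : List Int) : ∀ acc : List Int,
    (l.foldl (fun acc j => gownoIns f_x j acc) acc).length = acc.length + l.length := by
  induction l with
  | nil => intro acc; simp
  | cons j l ih =>
      intro acc
      simp only [List.foldl_cons]
      rw [ih, ins_length]
      simp only [List.length_cons]
      omega

-- A's second loop: the counter i visits 0,1,2,3,0,1,... i.e. position t picks index t % 4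
theorem loopA2 (g : Int → Int) (l : List Int) : ∀ (acc : List Int) (i : Int), 0 ≤ i → i ≤ 4 →
    (l.foldl (fun (st : List Int × Int) _j =>
        (st.1 ++ [g (if st.2 == 4 then 0 else st.2)], (if st.2 == 4 then 0 else st.2) + 1)) (acc, i)).1
    = acc ++ (List.range l.length).map
        (fun (t : Nat) => g (PySem.Int.mod ((if i = 4 then 0 else i) + (t : Int)) 4)) := by
  induction l with
  | nil => intros; simp
  | cons _ l ih =>
      intro acc i h0 h4
      have h4' : (0:Int) < 4 := by norm_num
      set i0 := if i = 4 then (0:Int) else i with hi0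
      have hred : (if ((i == 4)) = true then (0:Int) else i) = i0 := by
        rw [hi0]; by_cases hi : i = 4 <;> simp [hi]
      have hb0 : 0 ≤ i0 := by rw [hi0]; split_ifs <;> omega
      have hb1 : i0 < 4 := by rw [hi0]; split_ifs <;> omega
      simp only [List.foldl_cons]
      rw [hred]
      rw [ih (acc ++ [g i0]) (i0 + 1) (by omega) (by omega)]
      simp only [List.length_cons]
      rw [List.range_succ_eq_map, List.map_cons, List.map_map, List.append_assoc,
        List.singleton_append]
      have hm : PySem.Int.mod i0 4 = i0 := by
        rw [PySem.Int.mod_eq_emod_of_pos h4']; omega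
      congr 1
      congr 1
      · norm_num
        congr 1
        omega
      · apply List.map_congr_left
        intro t _
        simp only [Function.comp_apply]
        rw [PySem.Int.mod_eq_emod_of_pos h4', PySem.Int.mod_eq_emod_of_pos h4']
        congr 1
        split_ifs with h <;> (push_cast; omega)

theorem foldTrunc0 (f_x : List Int) (l : List Int) :
    l.foldl (fun best j => (gownoIns f_x j best).take 4) []
    = (l.foldl (fun best j => gownoIns f_x j best) []).take 4 := by
  have h := foldTrunc f_x l []
  simpa using h

-- the index A reads from the sorted records equals the index B reads from the top-4 list
theorem idx_eq (f_x : List Int) (xs : List Int) (t : Nat) (ht : t < xs.length) :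
    PySem.Dict.getD (PySem.List.pyGetD
        (xs.map (fun b => mkd (PySem.List.pyGetD f_x b 0) b)) (PySem.Int.mod (t : Int) 4)
        PySem.Dict.empty) "index" 0
    = PySem.List.pyGetD (xs.take 4) (PySem.Int.mod (t : Int) ((xs.take 4).length : Int)) 0 := by
  have hklen : (xs.take 4).length = min 4 xs.length := by simp [List.length_take]
  have hm1 : PySem.Int.mod (t : Int) 4 = ((t % 4 : Nat) : Int) := by
    exact_mod_cast PySem.Int.mod_natCast t 4
  have hm2 : PySem.Int.mod (t : Int) ((xs.take 4).length : Int)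
      = ((t % (xs.take 4).length : Nat) : Int) := PySem.Int.mod_natCast t _
  have hmod4 : t % 4 = t % (xs.take 4).length := by
    rw [hklen]
    rcases Nat.lt_or_ge xs.length 4 with h | h
    · rw [Nat.min_eq_right (Nat.le_of_lt h), Nat.mod_eq_of_lt ht, Nat.mod_eq_of_lt (ht.trans h)]
    · rw [Nat.min_eq_left h]
  rw [hm1, hm2, PySem.List.pyGetD_natCast, PySem.List.pyGetD_natCast, hmod4]
  have hkpos : 0 < (xs.take 4).length := by
    rw [hklen]; omega
  have hmk : t % (xs.take 4).length < (xs.take 4).length := Nat.mod_lt t hkpos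
  have hmx : t % (xs.take 4).length < xs.length := by
    have := hmk; rw [hklen] at this; omega
  rw [List.getD_eq_getElem _ _ (by simpa using hmx), List.getElem_map, mkd_ikey,
    List.getD_eq_getElem _ _ hmk, List.getElem_take]

theorem posL_le (f_x : List Int) (fj : Int) (best : List Int) :
    posL f_x fj best ≤ best.length := by
  induction best with
  | nil => simp [posL]
  | cons b bs ih =>
      by_cases h : PySem.List.pyGetD f_x b 0 < fj
      · simp [posL, h]
      · simp only [posL, h, if_neg, not_false_iff, List.length_cons]
        omega

theorem ins_eq_split (f_x : List Int) (j : Int) (best : List Int) :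
    gownoIns f_x j best
    = best.take (posL f_x (PySem.List.pyGetD f_x j 0) best) ++
        j :: best.drop (posL f_x (PySem.List.pyGetD f_x j 0) best) := by
  induction best with
  | nil => simp [gownoIns, posL]
  | cons b bs ih =>
      by_cases h : PySem.List.pyGetD f_x b 0 < PySem.List.pyGetD f_x j 0
      · simp [gownoIns, posL, h]
      · simp [gownoIns, posL, h, ih]

theorem P_at_posL (f_x : List Int) (fj : Int) (best : List Int)
    (h : posL f_x fj best < best.length) :
    PySem.List.pyGetD f_x (best[posL f_x fj best]'h) 0 < fj := by
  induction best with
  | nil => simp at h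
  | cons b bs ih =>
      by_cases hb : PySem.List.pyGetD f_x b 0 < fj
      · simp [posL, hb]
      · have hq : posL f_x fj (b :: bs) = posL f_x fj bs + 1 := by simp [posL, hb]
        have h2 : posL f_x fj bs < bs.length := by
          have h3 := h; rw [hq] at h3; simpa using h3
        simp only [hq, List.getElem_cons_succ]
        exact ih h2

theorem posL_le_of_P (f_x : List Int) (fj : Int) (best : List Int) (i : Nat)
    (hi : i < best.length) (hP : PySem.List.pyGetD f_x (best[i]'hi) 0 < fj) :
    posL f_x fj best ≤ i := by
  induction best generalizing i with
  | nil => simp at hi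
  | cons b bs ih =>
      by_cases hb : PySem.List.pyGetD f_x b 0 < fj
      · simp [posL, hb]
      · cases i with
        | zero => simp at hP; exact absurd hP hb
        | succ m =>
            have : posL f_x fj (b :: bs) = posL f_x fj bs + 1 := by simp [posL, hb]
            rw [this]
            have := ih m (by simpa using hi) (by simpa using hP)
            omega

theorem posEq (f_x : List Int) (fj : Int) (best : List Int)
    (hpw : best.Pairwise (fun a b => PySem.List.pyGetD f_x b 0 ≤ PySem.List.pyGetD f_x a 0)) :
    ∀ p, p ≤ best.length →
      (∀ i, p ≤ i → (hi : i < best.length) → PySem.List.pyGetD f_x (best[i]'hi) 0 < fj) →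
      gownoPos f_x fj best p = min (posL f_x fj best) p := by
  intro p
  induction p with
  | zero => intros; simp [gownoPos]
  | succ p ih =>
      intro hp hsuf
      have hplt : p < best.length := hp
      have haccess : PySem.List.pyGetD best ((p : Nat) : Int) 0 = best[p]'hplt := by
        rw [PySem.List.pyGetD_natCast, List.getD_eq_getElem _ _ hplt]
      by_cases hPp : PySem.List.pyGetD f_x (best[p]'hplt) 0 < fj
      · have hstep : gownoPos f_x fj best (p + 1) = gownoPos f_x fj best p := by
          simp [gownoPos, haccess, hPp]
        rw [hstep, ih (by omega) (by
          intro i h1 h2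
          rcases Nat.eq_or_lt_of_le h1 with h | h
          · subst h; exact hPp
          · exact hsuf i h h2)]
        have hq : posL f_x fj best ≤ p := posL_le_of_P f_x fj best p hplt hPp
        omega
      · have hstep : gownoPos f_x fj best (p + 1) = p + 1 := by
          simp [gownoPos, haccess, hPp]
        rw [hstep]
        have hq : p + 1 ≤ posL f_x fj best := by
          by_contra hlt
          have hql : posL f_x fj best < best.length := by omega
          have hPq := P_at_posL f_x fj best hql
          rcases Nat.eq_or_lt_of_le (by omega : posL f_x fj best ≤ p) with h | h
          · exact hPp (by simp [h] at hPq; exact hPq)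
          · have hpair := (List.pairwise_iff_getElem.mp hpw) _ _ hql hplt h
            exact hPp (lt_of_le_of_lt hpair hPq)
        omega

theorem gownoPos_eq (f_x : List Int) (fj : Int) (best : List Int)
    (hpw : best.Pairwise (fun a b => PySem.List.pyGetD f_x b 0 ≤ PySem.List.pyGetD f_x a 0)) :
    gownoPos f_x fj best best.length = posL f_x fj best := by
  rw [posEq f_x fj best hpw best.length le_rfl (by intro i h1 h2; omega)]
  exact Nat.min_eq_left (posL_le f_x fj best)

theorem mem_gownoIns (f_x : List Int) (j : Int) (best : List Int) (x : Int) :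
    x ∈ gownoIns f_x j best ↔ x = j ∨ x ∈ best := by
  induction best with
  | nil => simp [gownoIns]
  | cons b bs ih =>
      by_cases h : PySem.List.pyGetD f_x b 0 < PySem.List.pyGetD f_x j 0
      · simp [gownoIns, h]
      · simp [gownoIns, h, ih]
        tauto

theorem insPairwise (f_x : List Int) (j : Int) (best : List Int)
    (hpw : best.Pairwise (fun a b => PySem.List.pyGetD f_x b 0 ≤ PySem.List.pyGetD f_x a 0)) :
    (gownoIns f_x j best).Pairwise
      (fun a b => PySem.List.pyGetD f_x b 0 ≤ PySem.List.pyGetD f_x a 0) := by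
  induction best with
  | nil => simp [gownoIns]
  | cons b bs ih =>
      rcases List.pairwise_cons.mp hpw with ⟨hb, hbs⟩
      by_cases h : PySem.List.pyGetD f_x b 0 < PySem.List.pyGetD f_x j 0
      · simp only [gownoIns, h, if_pos]
        refine List.pairwise_cons.mpr ⟨?_, hpw⟩
        intro x hx
        rcases List.mem_cons.mp hx with rfl | hx2
        · exact le_of_lt h
        · exact (hb x hx2).trans (le_of_lt h)
      · simp only [gownoIns, h, if_neg, not_false_iff]
        refine List.pairwise_cons.mpr ⟨?_, ih hbs⟩
        intro x hx
        rcases (mem_gownoIns f_x j bs x).mp hx with rfl | hx2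
        · omega
        · exact hb x hx2

theorem stepEq (f_x : List Int) (best : List Int) (j : Int) (hlen : best.length ≤ 4)
    (hpw : best.Pairwise (fun a b => PySem.List.pyGetD f_x b 0 ≤ PySem.List.pyGetD f_x a 0)) :
    gownoStep f_x best j = (gownoIns f_x j best).take 4 := by
  simp only [gownoStep]
  rw [gownoPos_eq f_x _ best hpw]
  have hqle := posL_le f_x (PySem.List.pyGetD f_x j 0) best
  have hl : (gownoIns f_x j best).length = best.length + 1 := ins_length f_x j best
  by_cases h4 : posL f_x (PySem.List.pyGetD f_x j 0) best < 4
  · rw [if_pos h4]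
    rw [PySem.List.insert_natCast best _ j (by omega)]
    rw [← ins_eq_split f_x j best]
    by_cases h5 : 4 < (gownoIns f_x j best).length
    · rw [if_pos h5]
      have hb4 : best.length = 4 := by omega
      rw [List.dropLast_eq_take]
      rw [hl, hb4]
    · rw [if_neg h5, List.take_of_length_le (by omega)]
  · rw [if_neg h4]
    have hq4 : posL f_x (PySem.List.pyGetD f_x j 0) best = 4 := by omega
    have hlen4 : best.length = 4 := by omega
    rw [ins_eq_split f_x j best, hq4]
    rw [show best.drop 4 = [] from by rw [← hlen4]; exact List.drop_length]
    rw [List.take_append_of_le_length (by simp [List.length_take]; omega)]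
    simp [List.take_of_length_le (show best.length ≤ 4 from by omega)]

theorem foldStep (f_x : List Int) (l : List Int) : ∀ best, best.length ≤ 4 →
    best.Pairwise (fun a b => PySem.List.pyGetD f_x b 0 ≤ PySem.List.pyGetD f_x a 0) →
    l.foldl (gownoStep f_x) best = l.foldl (fun best j => (gownoIns f_x j best).take 4) best := by
  induction l with
  | nil => intros; rfl
  | cons j l ih =>
      intro best hlen hpw
      simp only [List.foldl_cons]
      rw [stepEq f_x best j hlen hpw]
      refine ih _ (by rw [List.length_take]; omega) ?_
      exact (insPairwise f_x j best hpw).sublist (List.take_sublist 4 (gownoIns f_x j best))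

theorem gowno_spec : Claim_equal_gowno := by
  unfold Claim_equal_gowno
  intro popul f_x _hdom _hpre
  unfold Spec_gowno
  by_cases hn : popul.length = 0
  · simp only [gowno, gowno_alt, hn]
    norm_num [PySem.List.pyRange_one_eq_nil]
  · -- unfold both ports
    simp only [gowno, gowno_alt]
    set L := PySem.List.pyRange 0 (popul.length : Int) 1 with hLdef
    have hLlen : L.length = popul.length := by
      rw [hLdef, PySem.List.length_pyRange_one]
      omega
    -- A, phase 1: the record list
    rw [show PySem.Dict.ofList [("f_x", (0 : Int)), ("index", (0 : Int))] = mkd 0 0 from rfl,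
      foldA1 f_x L [] 0 0]
    simp only [List.nil_append]
    -- A, phase 2: the sort
    rw [sortedA f_x L]
    set sortIdx := L.foldl (fun acc j => gownoIns f_x j acc) [] with hSdef
    -- A, phase 3: the emission loop
    have h2 := loopA2 (fun i => PySem.List.pyGetD popul
        (PySem.Dict.getD (PySem.List.pyGetD
          (sortIdx.map (fun b => mkd (PySem.List.pyGetD f_x b 0) b)) i PySem.Dict.empty)
          "index" 0) 0) L [] 0 (by norm_num) (by norm_num)
    simp only [] at h2
    rw [h2]
    -- B
    rw [foldStep f_x L [] (by simp) List.Pairwise.nil, foldTrunc0 f_x L, ← hSdef]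
    rw [show (((popul.length : Int)) == 0) = false from by simpa using hn]
    simp only [Bool.false_eq_true, if_false, if_neg (by norm_num : ¬(0 : Int) = 4), zero_add,
      List.nil_append, hLlen]
    -- elementwise
    rw [hLdef, PySem.List.pyRange_zero]
    simp only [Int.toNat_natCast, List.map_map]
    apply List.map_congr_left
    intro t ht
    have ht' : t < popul.length := List.mem_range.mp ht
    have hslen : sortIdx.length = popul.length := by
      rw [hSdef, foldIns_length]
      simpa using hLlen
    simp only [Function.comp_apply]
    rw [idx_eq f_x sortIdx t (by omega)]
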